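-- pv_equiv track=rewrite | github.com/facebookresearch/fairseq2 | src/fairseq2/models/transformer/_attention_bias.py | _get_seq_ranges
-- ===== SOURCE A (Python) =====
-- from collections.abc import Sequence
--
-- def _get_seq_ranges(seq_lens: Sequence[int]) -> list[tuple[int, int]]:
--     seq_ranges = []
--
--     seq_beg = 0
--
--     for seq_len in seq_lens:
--         seq_end = seq_beg + seq_len
--
--         seq_ranges.append((seq_beg, seq_end))
--
--         seq_beg = seq_end
--
--     return seq_ranges
-- ===== SOURCE B (Python) =====
-- def _get_seq_ranges(seq_lens):
--     return [(sum(seq_lens[:i]), sum(seq_lens[:i + 1])) for i in range(len(seq_lens))]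
-- ===== Notes on version B (the rewrite author's own statement) =====
-- stated objective: alternative
-- what changed: B abandons the running accumulator entirely: each (start,end) pair is computed independently as a pair of slice sums sum(seq_lens[:i]) and sum(seq_lens[:i+1]) over the index range, a brute-force O(n^2) formulation.
import Mathlib
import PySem

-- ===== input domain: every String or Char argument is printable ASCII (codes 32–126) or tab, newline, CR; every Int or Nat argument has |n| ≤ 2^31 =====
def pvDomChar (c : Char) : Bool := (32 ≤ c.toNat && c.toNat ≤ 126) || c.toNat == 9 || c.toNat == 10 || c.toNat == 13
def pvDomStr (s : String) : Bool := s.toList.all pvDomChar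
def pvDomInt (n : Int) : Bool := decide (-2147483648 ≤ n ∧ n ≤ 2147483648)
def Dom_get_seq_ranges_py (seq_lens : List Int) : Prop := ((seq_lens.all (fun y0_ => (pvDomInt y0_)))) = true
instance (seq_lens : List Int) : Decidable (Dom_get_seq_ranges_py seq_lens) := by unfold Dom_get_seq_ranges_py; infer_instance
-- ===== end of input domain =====

-- B replaces the running-accumulator loop by independent per-index slice sums (alternative O(n^2) algorithm, not faster).


-- ===== PORT A =====
-- A's loop: running seq_beg, append (seq_beg, seq_beg+seq_len), advance.
def getSeqRangesLoop (seq_lens : List Int) (seq_beg : Int) : List (Int × Int) :=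
  match seq_lens with
  | [] => []
  | seq_len :: rest =>
    let seq_end := seq_beg + seq_len
    (seq_beg, seq_end) :: getSeqRangesLoop rest seq_end

def get_seq_ranges_py (seq_lens : List Int) : List (Int × Int) :=
  getSeqRangesLoop seq_lens 0

-- ===== PORT B =====
-- Python's sum(list): left fold of + starting at 0.
def pySum (xs : List Int) : Int := xs.foldl (· + ·) 0

-- B: for each index i, the pair of independent slice sums (no accumulator carried).
def get_seq_ranges_py_alt (seq_lens : List Int) : List (Int × Int) :=
  (List.range seq_lens.length).map (fun i =>
    (pySum (seq_lens.take i), pySum (seq_lens.take (i + 1))))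

-- ===== PRECONDITION & SPEC =====
def Spec_get_seq_ranges_py (seq_lens : List Int) (out : List (Int × Int)) : Prop := out = get_seq_ranges_py_alt seq_lens
instance (seq_lens : List Int) (out : List (Int × Int)) : Decidable (Spec_get_seq_ranges_py seq_lens out) := by unfold Spec_get_seq_ranges_py; infer_instance

-- ===== CLAIM (what is proved, stated in full; the proofs are below) =====
def Claim_equal_get_seq_ranges_py : Prop := ∀ (seq_lens : List Int), Dom_get_seq_ranges_py seq_lens → Spec_get_seq_ranges_py seq_lens (get_seq_ranges_py seq_lens)

-- ===== LEMMAS AND PROOFS =====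

-- ===== VERDICT (by name: the statement is the Claim_ definition above) =====
theorem foldl_add_shift (xs : List Int) (a : Int) :
    xs.foldl (· + ·) a = a + xs.foldl (· + ·) 0 := by
  induction xs generalizing a with
  | nil => simp
  | cons x rest ih =>
    simp only [List.foldl_cons]
    rw [ih (a + x), ih (0 + x)]
    ring

theorem loop_eq_map (xs : List Int) (b : Int) :
    getSeqRangesLoop xs b =
      (List.range xs.length).map (fun i =>
        (b + pySum (xs.take i), b + pySum (xs.take (i + 1)))) := by
  induction xs generalizing b with
  | nil => simp [getSeqRangesLoop]
  | cons l rest ih =>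
    simp only [getSeqRangesLoop, List.length_cons, List.range_succ_eq_map,
      List.map_cons, List.map_map]
    congr 1
    · simp [pySum]
    · rw [ih (b + l)]
      apply List.map_congr_left
      intro i _
      simp only [Function.comp, List.take_succ_cons, pySum, List.foldl_cons]
      rw [foldl_add_shift _ (0 + l), foldl_add_shift _ (0 + l)]
      simp only [Prod.mk.injEq]
      constructor <;> ring

-- ===== VERDICT =====
theorem get_seq_ranges_py_spec : Claim_equal_get_seq_ranges_py := by
  intro seq_lens _
  unfold Spec_get_seq_ranges_py get_seq_ranges_py get_seq_ranges_py_alt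
  rw [loop_eq_map]
  simp
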